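-- pv_equiv track=rewrite | github.com/gabriellaec/desoft-analise-exercicios | backup/user_320/ch9_2019_08_27_16_13_41_265158.py | lista_sufixos
-- ===== SOURCE A (Python) =====
-- def lista_sufixos(string):
--     sufixos = []
--     cont = 1
--     rascunho = []
--     while cont < len(string):
--         for letra in string[cont:]:
--             rascunho.append(letra)
--         sufixos.append(rascunho.copy())
--         rascunho.clear()
--         cont += 1
--
--     return sufixos
-- ===== SOURCE B (Python) =====
-- def lista_sufixos(string):
--     res = []
--     current = []
--     for cont in range(len(string) - 1, 0, -1):
--         current = [string[cont]] + current
--         res.append(current)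
--     return res[::-1]
-- ===== Notes on version B (the rewrite author's own statement) =====
-- stated objective: alternative
-- what changed: B builds each suffix by prepending one character to the previously built (shorter) suffix while counting down from len-1 to 1, then reverses the collected list, instead of A's per-index re-scan of string[cont:] character by character.
import Mathlib
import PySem

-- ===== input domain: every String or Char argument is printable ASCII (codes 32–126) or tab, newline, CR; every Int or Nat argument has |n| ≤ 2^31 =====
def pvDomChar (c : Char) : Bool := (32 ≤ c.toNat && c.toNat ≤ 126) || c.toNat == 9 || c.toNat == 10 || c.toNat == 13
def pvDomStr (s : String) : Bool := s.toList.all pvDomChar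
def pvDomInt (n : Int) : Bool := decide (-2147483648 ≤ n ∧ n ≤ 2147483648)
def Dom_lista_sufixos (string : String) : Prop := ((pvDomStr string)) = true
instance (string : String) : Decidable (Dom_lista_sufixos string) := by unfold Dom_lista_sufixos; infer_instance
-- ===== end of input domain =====

-- B builds each suffix by prepending one character to the previously built (shorter) suffix
-- while counting down, then reverses the collected list, instead of A's per-index re-scan of
-- string[cont:]; proved to return exactly A's value on every string.

-- ===== PORT A =====
-- A: for each cont in 1..len-1, re-scan string[cont:] appending each letter to rascunho,
-- append a copy to sufixos and clear rascunho (state = (sufixos, rascunho)).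
def lista_sufixos (string : String) : List (List String) :=
  let s := string.toList
  ((PySem.List.pyRange 1 (s.length : Int) 1).foldl
    (fun (st : List (List String) × List String) cont =>
      let rascunho := (PySem.List.slice s (some cont) none).foldl
        (fun r letra => r ++ [String.ofList [letra]]) st.2
      (st.1 ++ [rascunho], ([] : List String)))
    (([], []) : List (List String) × List String)).1

-- ===== PORT B =====
-- B: count down cont = len-1 .. 1, current = [string[cont]] + current (extends the previous,
-- shorter suffix), collect, then return res[::-1] (the pyGet? never misses here).
def lista_sufixos_alt (string : String) : List (List String) :=
  let s := string.toList
  let st := (PySem.List.pyRange ((s.length : Int) - 1) 0 (-1)).foldl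
    (fun (st : List (List String) × List String) cont =>
      let current := ((PySem.List.pyGet? s cont).map (fun c => String.ofList [c])).toList ++ st.2
      (st.1 ++ [current], current))
    (([], []) : List (List String) × List String)
  ((PySem.List.slice? st.1 none none (-1)).getD [])

-- ===== PRECONDITION & SPEC =====
def Spec_lista_sufixos (string : String) (out : List (List String)) : Prop := out = lista_sufixos_alt string
instance (string : String) (out : List (List String)) : Decidable (Spec_lista_sufixos string out) := by unfold Spec_lista_sufixos; infer_instance

-- ===== CLAIM (what is proved, stated in full; the proofs are below) =====
def Claim_equal_lista_sufixos : Prop := ∀ (string : String), Dom_lista_sufixos string → Spec_lista_sufixos string (lista_sufixos string)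

-- ===== LEMMAS AND PROOFS =====

-- general flatten fact 'exact?' finds no library name for
theorem pv_flatten_singleton {α β : Type} (l : List α) (f : α → β) :
    (l.map (fun x => [f x])).flatten = l.map f := by
  induction l with
  | nil => rfl
  | cons a l ih => simp [ih]

-- A's loop: rascunho is cleared each iteration, so the fold emits one mapped slice per index.
theorem pv_afold (s : List Char) (l : List Int) (acc : List (List String)) :
    (l.foldl (fun (st : List (List String) × List String) cont =>
        let rascunho := (PySem.List.slice s (some cont) none).foldl
          (fun r letra => r ++ [String.ofList [letra]]) st.2
        (st.1 ++ [rascunho], ([] : List String))) (acc, [])).1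
      = acc ++ l.map (fun cont =>
          (PySem.List.slice s (some cont) none).map (fun c => String.ofList [c])) := by
  induction l generalizing acc with
  | nil => simp
  | cons x xs ih =>
    simp only [List.foldl_cons]
    rw [ih]
    simp [pv_flatten_singleton]

-- B's loop: counting down from k with `current` holding the suffix starting at k+1,
-- each step extends it by one character and records it.
theorem pv_bfold (s : List Char) : ∀ (k : Nat), k + 1 ≤ s.length → ∀ (acc : List (List String)),
    ((PySem.List.pyRange (k : Int) 0 (-1)).foldl
        (fun (st : List (List String) × List String) cont =>
          let current := ((PySem.List.pyGet? s cont).map (fun c => String.ofList [c])).toList ++ st.2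
          (st.1 ++ [current], current))
        (acc, (s.drop (k + 1)).map (fun c => String.ofList [c]))).1
      = acc ++ (PySem.List.pyRange (k : Int) 0 (-1)).map (fun cont =>
          (s.drop cont.toNat).map (fun c => String.ofList [c])) := by
  intro k
  induction k with
  | zero => intro _ acc; simp [PySem.List.pyRange_neg_one_eq_nil]
  | succ k ih =>
    intro hk acc
    have hcons : PySem.List.pyRange ((k + 1 : Nat) : Int) 0 (-1)
        = ((k + 1 : Nat) : Int) :: PySem.List.pyRange (k : Int) 0 (-1) := by
      have := PySem.List.pyRange_neg_one_cons (a := ((k + 1 : Nat) : Int)) (b := 0) (by positivity)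
      simpa using this
    have hlt : k + 1 < s.length := by omega
    have hget : PySem.List.pyGet? s ((k + 1 : Nat) : Int) = some s[k + 1] := by
      simpa using PySem.List.pyGet?_eq_some_getElem (xs := s) (i := ((k + 1 : Nat) : Int))
        (by positivity) (by exact_mod_cast hlt)
    have hcur : String.ofList [s[k + 1]] :: (s.drop (k + 1 + 1)).map (fun c => String.ofList [c])
        = (s.drop (k + 1)).map (fun c => String.ofList [c]) := by
      rw [show k + 1 + 1 = k + 2 from rfl, List.drop_eq_getElem_cons hlt]
      simp only [List.map_cons]
    rw [hcons]
    simp only [List.foldl_cons, hget, Option.map_some, Option.toList_some, List.singleton_append,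
      hcur]
    rw [ih (by omega) (acc ++ [(s.drop (k + 1)).map (fun c => String.ofList [c])])]
    simp

-- ===== VERDICT (by name: the statement is the Claim_ definition above) =====
theorem lista_sufixos_spec : Claim_equal_lista_sufixos := by
  intro string _
  show lista_sufixos string = lista_sufixos_alt string
  simp only [lista_sufixos, lista_sufixos_alt]
  generalize string.toList = s
  rcases Nat.eq_zero_or_pos s.length with h0 | hpos
  · simp [PySem.List.pyRange_one_eq_nil, PySem.List.pyRange_neg_one_eq_nil, h0,
      PySem.List.slice?_none_none_neg_one]
  · have hn1 : ((s.length : Int) - 1) = ((s.length - 1 : Nat) : Int) := by omega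
    have hdropn : (s.drop (s.length - 1 + 1)).map (fun c => String.ofList [c]) = [] := by
      have h : s.length - 1 + 1 = s.length := by omega
      simp [h]
    have hB := pv_bfold s (s.length - 1) (by omega) []
    rw [hdropn] at hB
    have hrev : PySem.List.pyRange ((s.length - 1 : Nat) : Int) 0 (-1)
        = (PySem.List.pyRange 1 (s.length : Int) 1).reverse := by
      have h1 : ((s.length - 1 : Nat) : Int) + 1 = (s.length : Int) := by omega
      rw [PySem.List.pyRange_neg_one_eq_reverse, h1]
      norm_num
    rw [pv_afold, hn1, hB, hrev, PySem.List.slice?_none_none_neg_one]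
    simp only [List.nil_append, Option.getD_some, List.map_reverse, List.reverse_reverse]
    refine List.map_congr_left (fun cont hc => ?_)
    have hmem := (PySem.List.mem_pyRange_one).1 hc
    rw [PySem.List.slice_from (xs := s) (a := cont) (by omega)]
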